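-- pv_equiv track=rewrite | github.com/pureair/kerning-pairs | 2C_potential_pairs_grouped_kerning_text_ultra_compact.py | group_letters
-- ===== SOURCE A (Python) =====
-- def group_letters(letters, side_index):
--     groups = {}
--     for letter, sides in letters.items():
--         side = sides[side_index][:4] # Consider only the first four digits
--         if side not in groups:
--             groups[side] = []
--         groups[side].append(letter)
--     return groups
-- ===== SOURCE B (Python) =====
-- def group_letters(letters, side_index):
--     # Two-pass: dedup the 4-char keys in first-occurrence order, then one
--     # filtering comprehension per key. No incremental dict-of-lists bucketing.
--     key = lambda sides: sides[side_index][:4]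
--     keys = list(dict.fromkeys(key(sides) for sides in letters.values()))
--     return {k: [letter for letter, sides in letters.items() if key(sides) == k]
--             for k in keys}
-- ===== Notes on version B (the rewrite author's own statement) =====
-- stated objective: alternative
-- what changed: Replaces A's one-pass mutable dict-of-lists bucketing by a two-pass comprehension: dedup the 4-char keys in first-occurrence order, then build each group with one filtering scan per key.
import Mathlib
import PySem

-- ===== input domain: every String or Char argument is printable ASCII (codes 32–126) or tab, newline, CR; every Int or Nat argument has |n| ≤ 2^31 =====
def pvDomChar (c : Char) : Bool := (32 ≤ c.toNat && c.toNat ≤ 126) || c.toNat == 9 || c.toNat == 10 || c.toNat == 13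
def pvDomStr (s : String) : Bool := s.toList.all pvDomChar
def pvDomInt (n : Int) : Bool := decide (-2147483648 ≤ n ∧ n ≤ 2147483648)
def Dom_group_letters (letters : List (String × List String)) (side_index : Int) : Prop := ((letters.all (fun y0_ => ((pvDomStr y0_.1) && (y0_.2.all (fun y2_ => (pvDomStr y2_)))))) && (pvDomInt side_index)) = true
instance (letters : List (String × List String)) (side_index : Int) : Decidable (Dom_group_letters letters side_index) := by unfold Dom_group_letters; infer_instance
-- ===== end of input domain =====

-- B replaces A's one-pass mutable dict-of-lists bucketing by a two-pass comprehension
-- (ordered key dedup, then one filtering scan per key); alternative structure, same results.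


-- ===== PORT A =====
def group_letters (letters : List (String × List String)) (side_index : Int) : List (String × List String) :=
  (letters.foldl
    (fun groups p =>
      let side := PySem.Str.slice (PySem.List.pyGetD p.2 side_index "") none (some 4)
      let groups := if groups.contains side then groups else groups.insert side ([] : List String)
      groups.modify side [] (fun l => l ++ [p.1]))
    PySem.Dict.empty).items

-- ===== PORT B =====
def group_letters_alt (letters : List (String × List String)) (side_index : Int) : List (String × List String) :=
  let key := fun (sides : List String) =>
    PySem.Str.slice (PySem.List.pyGetD sides side_index "") none (some 4)
  let keys := PySem.List.dedup (letters.map (fun p => key p.2))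
  keys.map (fun k => (k, (letters.filter (fun p => key p.2 == k)).map (fun p => p.1)))

-- ===== PRECONDITION & SPEC =====
-- Pre_ excludes exactly the inputs on which A raises IndexError: some sides list
-- has no element at side_index (Python negative indexing included).
def Pre_group_letters (letters : List (String × List String)) (side_index : Int) : Prop :=
  ∀ p ∈ letters, PySem.Raise.InRange p.2.length side_index
instance (letters : List (String × List String)) (side_index : Int) : Decidable (Pre_group_letters letters side_index) := by unfold Pre_group_letters; infer_instance

def pvWitness_group_letters : (List (String × List String)) × Int := ([("A", ["12345", "67"])], 0)

def Spec_group_letters (letters : List (String × List String)) (side_index : Int) (out : List (String × List String)) : Prop := out = group_letters_alt letters side_index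
instance (letters : List (String × List String)) (side_index : Int) (out : List (String × List String)) : Decidable (Spec_group_letters letters side_index out) := by unfold Spec_group_letters; infer_instance

-- ===== CLAIM (what is proved, stated in full; the proofs are below) =====
def Claim_equal_group_letters : Prop := ∀ (letters : List (String × List String)) (side_index : Int), Dom_group_letters letters side_index → Pre_group_letters letters side_index → Spec_group_letters letters side_index (group_letters letters side_index)

-- ===== LEMMAS AND PROOFS =====

-- get? of a key freshly appended at the end of an association list it does not occur in.
theorem get?_mk_append_of_not_mem {ν : Type} (l : List (String × ν)) (k : String) (v : ν)
    (h : k ∉ l.map Prod.fst) :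
    (PySem.Dict.mk (l ++ [(k, v)])).get? k = some v := by
  induction l with
  | nil => simp [PySem.Dict.get?_mk_cons]
  | cons p rest ih =>
    obtain ⟨a, b⟩ := p
    simp only [List.map_cons, List.mem_cons] at h
    push_neg at h
    rw [List.cons_append, PySem.Dict.get?_mk_cons, if_neg (by simp [beq_iff_eq]; exact fun he => h.1 he.symm)]
    exact ih h.2

-- A's loop body ("if side not in groups: groups[side] = []; groups[side].append(letter)")
-- is one Dict.modify with default [].
theorem step_eq_modify (groups : PySem.Dict String (List String)) (side letter : String) :
    ((if groups.contains side then groups else groups.insert side []).modify side []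
      (fun l => l ++ [letter]))
      = groups.modify side [] (fun l => l ++ [letter]) := by
  by_cases h : groups.contains side
  · rw [if_pos h]
  · rw [if_neg h]
    have hnk : side ∉ groups.items.map Prod.fst := by
      have := PySem.Dict.contains_iff_mem_keys (d := groups) (k := side)
      simp only [PySem.Dict.keys] at this
      intro hm; exact h (this.mpr hm)
    simp only [Bool.not_eq_true] at h
    simp [PySem.Dict.modify, PySem.Dict.insert, h]
    constructor
    · have hc : ∀ p ∈ groups.items,
        (fun p => if p.1 = side then
            (side, (PySem.Dict.mk (groups.items ++ [(side, ([] : List String))])).getD side [] ++ [letter])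
          else p) p = id p := by
        intro p hp
        simp only [id]
        rw [if_neg]
        intro he; exact hnk (he ▸ List.mem_map_of_mem hp)
      rw [List.map_congr_left hc, List.map_id]
    · rw [PySem.Dict.getD_of_not_contains _ _ h,
        PySem.Dict.getD_eq_get?_getD, get?_mk_append_of_not_mem _ _ _ hnk]
      rfl

-- ===== VERDICT (by name: the statement is the Claim_ definition above) =====
theorem group_letters_spec : Claim_equal_group_letters := by
  intro letters side_index _ _
  unfold Spec_group_letters group_letters group_letters_alt
  -- abbreviate the key function
  set key := fun (sides : List String) =>
    PySem.Str.slice (PySem.List.pyGetD sides side_index "") none (some 4) with hkey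
  -- 1. each loop step is a single modify
  have hfold :
      letters.foldl
        (fun groups p =>
          let side := key p.2
          let groups := if groups.contains side then groups else groups.insert side ([] : List String)
          groups.modify side [] (fun l => l ++ [p.1]))
        PySem.Dict.empty
      = (letters.map (fun p => (key p.2, p.1))).foldl
          (fun d q => d.modify q.1 [] (fun l => l ++ [q.2])) PySem.Dict.empty := by
    rw [List.foldl_map]
    exact PySem.List.foldl_congr_mem letters _ _ _
      (fun g p _ => step_eq_modify g (key p.2) p.1)
  rw [hfold]
  set d := (letters.map (fun p => (key p.2, p.1))).foldl
      (fun d q => d.modify q.1 [] (fun l => l ++ [q.2])) PySem.Dict.empty with hd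
  -- 2. the keys of d are the deduped key list
  have hkeys : d.keys = PySem.List.dedup (letters.map (fun p => key p.2)) := by
    rw [hd, PySem.Dict.keys_foldl_modify_key _ Prod.fst _ (fun _ q => fun l => l ++ [q.2])]
    simp [PySem.Set.update_nil_left, List.map_map, Function.comp_def]
  have hnd : d.keys.Nodup := by
    rw [hd]
    exact PySem.Dict.nodup_keys_foldl_modify_key _ Prod.fst _ _ _ (by simp)
  -- 3. each group is the filtered letters
  have hget : ∀ k, d.getD k [] = (letters.filter (fun p => key p.2 == k)).map (fun p => p.1) := by
    intro k
    rw [hd, PySem.Dict.getD_foldl_modify_append]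
    simp only [List.filter_map, List.map_map, Function.comp_def, PySem.Dict.getD_empty, List.nil_append]
  -- 4. assemble
  rw [PySem.Dict.items_eq_map_keys d hnd [], hkeys]
  exact List.map_congr_left (fun k _ => by rw [hget k])
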